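-- pv_equiv track=rewrite | github.com/leiz2192/Python | sliding-window-unique-elements-sum/sliding-window-unique-elements-sum.py | slidingWindowUniqueElementsSum
-- ===== SOURCE A (Python) =====
-- def slidingWindowUniqueElementsSum(nums, k):
--     # write your code here
--     sum = 0
--     nums_size = len(nums)
--     win_count = 0
--     ele_count = 0
--     if nums_size < k:
--         win_count = 1
--         ele_count = nums_size
--     else:
--         win_count = nums_size - k + 1
--         ele_count = k
--
--     win_eles = []
--     rep_eles = {}
--     for ele_index in range(ele_count):
--         ele = nums[ele_index]
--         if win_eles.count(ele) > 0:
--             win_eles.remove(ele)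
--             rep_eles[ele] = 1
--
--         if ele in rep_eles:
--             rep_eles[ele] += 1
--         else:
--             win_eles.append(ele)
--     sum += len(win_eles)
--
--     for win_index in range(1, win_count):
--         ele = nums[win_index - 1]
--         if ele in rep_eles:
--             if rep_eles[ele] == 2:
--                 win_eles.append(ele)
--                 del rep_eles[ele]
--             elif rep_eles[ele] > 2:
--                 rep_eles[ele] -= 1
--         else:
--             win_eles.remove(ele)
--
--         ele = nums[ele_count + win_index  - 1]
--         if win_eles.count(ele) > 0:
--             win_eles.remove(ele)
--             rep_eles[ele] = 1
--
--         if ele in rep_eles: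
--             rep_eles[ele] += 1
--         else:
--             win_eles.append(ele)
--         sum += len(win_eles)
--     return sum
-- ===== SOURCE B (Python) =====
-- def slidingWindowUniqueElementsSum(nums, k):
--     n = len(nums)
--     w = k if k < n else n
--     freq = {}
--     unique = 0
--     for x in nums[:w]:
--         c = freq.get(x, 0)
--         if c == 0:
--             unique += 1
--         elif c == 1:
--             unique -= 1
--         freq[x] = c + 1
--     total = unique
--     for i in range(w, n):
--         y = nums[i - w]
--         c = freq.get(y, 0)
--         if c == 1:
--             unique -= 1
--         elif c == 2:
--             unique += 1
--         freq[y] = c - 1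
--         x = nums[i]
--         c = freq.get(x, 0)
--         if c == 0:
--             unique += 1
--         elif c == 1:
--             unique -= 1
--         freq[x] = c + 1
--         total += unique
--     return total
-- ===== Notes on version B (the rewrite author's own statement) =====
-- stated objective: faster
-- what changed: Replaces A's unique-list plus duplicates-dict bookkeeping (with O(k) list.count/remove scans per window step) by a single frequency dict and a running count of frequency-1 elements, updated incrementally as each window slides.
import Mathlib
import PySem

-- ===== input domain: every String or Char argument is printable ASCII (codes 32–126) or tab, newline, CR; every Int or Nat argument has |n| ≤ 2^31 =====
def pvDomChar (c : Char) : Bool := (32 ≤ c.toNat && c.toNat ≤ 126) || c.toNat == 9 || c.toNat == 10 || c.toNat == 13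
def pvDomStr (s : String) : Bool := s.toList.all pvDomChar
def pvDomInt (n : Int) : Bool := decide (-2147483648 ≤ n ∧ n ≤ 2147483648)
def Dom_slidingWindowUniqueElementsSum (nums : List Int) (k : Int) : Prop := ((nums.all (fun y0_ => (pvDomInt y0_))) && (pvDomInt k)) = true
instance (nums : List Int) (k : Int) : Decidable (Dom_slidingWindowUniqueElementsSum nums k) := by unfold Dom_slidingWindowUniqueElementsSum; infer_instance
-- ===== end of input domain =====

-- B replaces A's unique-list + duplicates-dict bookkeeping (O(k) list scans per window step)
-- by one frequency dict with a running count of frequency-1 elements: O(n) instead of O(n*k).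

-- ===== PORT A =====
-- the add-an-element step of A's loops (Python lines 18-26 / 40-46); 'win_eles.remove' raises
-- where remove? is none — inside Pre_ that never happens, the .getD fallback is never taken
def aAdd (winEles : List Int) (repEles : PySem.Dict Int Int) (ele : Int) :
    List Int × PySem.Dict Int Int :=
  let st :=
    if 0 < PySem.List.count winEles ele then
      ((PySem.List.remove? winEles ele).getD winEles, repEles.insert ele 1)
    else (winEles, repEles)
  if st.2.contains ele then (st.1, st.2.insert ele (st.2.getD ele 0 + 1))
  else (st.1 ++ [ele], st.2)

-- the drop-the-outgoing-element step of A's second loop (Python lines 30-38)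
def aRemove (winEles : List Int) (repEles : PySem.Dict Int Int) (ele : Int) :
    List Int × PySem.Dict Int Int :=
  if repEles.contains ele then
    if repEles.getD ele 0 = 2 then (winEles ++ [ele], repEles.erase ele)
    else if 2 < repEles.getD ele 0 then (winEles, repEles.insert ele (repEles.getD ele 0 - 1))
    else (winEles, repEles)
  else ((PySem.List.remove? winEles ele).getD winEles, repEles)

-- the body of A's second loop (one win_index iteration)
def aBody (nums : List Int) (eleCount : Int) (st : Int × List Int × PySem.Dict Int Int)
    (winIndex : Int) : Int × List Int × PySem.Dict Int Int :=
  let p1 := aRemove st.2.1 st.2.2 (PySem.List.pyGetD nums (winIndex - 1) 0)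
  let p2 := aAdd p1.1 p1.2 (PySem.List.pyGetD nums (eleCount + winIndex - 1) 0)
  (st.1 + (p2.1.length : Int), p2.1, p2.2)

def slidingWindowUniqueElementsSum (nums : List Int) (k : Int) : Int :=
  let numsSize : Int := (nums.length : Int)
  let winCount : Int := if numsSize < k then 1 else numsSize - k + 1
  let eleCount : Int := if numsSize < k then numsSize else k
  let st0 := (PySem.List.pyRange 0 eleCount).foldl
      (fun st i => aAdd st.1 st.2 (PySem.List.pyGetD nums i 0)) ([], PySem.Dict.empty)
  let sum : Int := (st0.1.length : Int)
  ((PySem.List.pyRange 1 winCount).foldl (aBody nums eleCount) (sum, st0.1, st0.2)).1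

-- ===== PORT B =====
-- B's add-an-element step: bump the frequency, maintain the running number of freq-1 elements
def bAdd (freq : PySem.Dict Int Int) (unique : Int) (x : Int) : PySem.Dict Int Int × Int :=
  let c := freq.getD x 0
  let unique := if c = 0 then unique + 1 else if c = 1 then unique - 1 else unique
  (freq.insert x (c + 1), unique)

-- B's drop-an-element step
def bRemove (freq : PySem.Dict Int Int) (unique : Int) (y : Int) : PySem.Dict Int Int × Int :=
  let c := freq.getD y 0
  let unique := if c = 1 then unique - 1 else if c = 2 then unique + 1 else unique
  (freq.insert y (c - 1), unique)

-- the body of B's sliding loop (one i iteration)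
def bBody (nums : List Int) (w : Int) (st : PySem.Dict Int Int × Int × Int) (i : Int) :
    PySem.Dict Int Int × Int × Int :=
  let p1 := bRemove st.1 st.2.1 (PySem.List.pyGetD nums (i - w) 0)
  let p2 := bAdd p1.1 p1.2 (PySem.List.pyGetD nums i 0)
  (p2.1, p2.2, st.2.2 + p2.2)

def slidingWindowUniqueElementsSum_alt (nums : List Int) (k : Int) : Int :=
  let n : Int := (nums.length : Int)
  let w : Int := if k < n then k else n
  let p0 := (PySem.List.slice nums none (some w)).foldl
      (fun st x => bAdd st.1 st.2 x) (PySem.Dict.empty, 0)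
  ((PySem.List.pyRange w n).foldl (bBody nums w) (p0.1, p0.2, p0.2)).2.2

-- ===== PRECONDITION & SPEC =====
-- Pre_ excludes k ≤ 0 (except the empty list with k = 0): there A's 'win_eles.remove' raises
-- ValueError (k = 0, nums ≠ []) or a negative index / IndexError is hit (k < 0).
def Pre_slidingWindowUniqueElementsSum (nums : List Int) (k : Int) : Prop :=
  1 ≤ k ∨ (nums = [] ∧ k = 0)
instance (nums : List Int) (k : Int) : Decidable (Pre_slidingWindowUniqueElementsSum nums k) := by
  unfold Pre_slidingWindowUniqueElementsSum; infer_instance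
def pvWitness_slidingWindowUniqueElementsSum : List Int × Int := ([1, 2, 1, 3], 2)


def Spec_slidingWindowUniqueElementsSum (nums : List Int) (k : Int) (out : Int) : Prop :=
  out = slidingWindowUniqueElementsSum_alt nums k
instance (nums : List Int) (k : Int) (out : Int) :
    Decidable (Spec_slidingWindowUniqueElementsSum nums k out) := by
  unfold Spec_slidingWindowUniqueElementsSum; infer_instance

-- ===== CLAIM (what is proved, stated in full; the proofs are below) =====
def Claim_equal_slidingWindowUniqueElementsSum : Prop :=
  ∀ (nums : List Int) (k : Int), Dom_slidingWindowUniqueElementsSum nums k →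
    Pre_slidingWindowUniqueElementsSum nums k →
    Spec_slidingWindowUniqueElementsSum nums k (slidingWindowUniqueElementsSum nums k)
-- ===== LEMMAS AND PROOFS =====

-- the coupling invariant: win is the current window contents (as a list); A's state is
-- (winEles, repEles), B's state is (freq, unique)
def WRel (win winEles : List Int) (repEles freq : PySem.Dict Int Int) (unique : Int) : Prop :=
  winEles.Nodup ∧
  (∀ x : Int, x ∈ winEles ↔ win.count x = 1) ∧
  (∀ x : Int, repEles.get? x = if 2 ≤ win.count x then some ((win.count x : Nat) : Int) else none) ∧
  (∀ x : Int, freq.getD x 0 = ((win.count x : Nat) : Int)) ∧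
  unique = (winEles.length : Int)

lemma dict_get?_erase (d : PySem.Dict Int Int) (k k' : Int) :
    (d.erase k).get? k' = if k' = k then none else d.get? k' := by
  rcases d with ⟨items⟩
  simp only [PySem.Dict.erase, PySem.Dict.get?]
  induction items with
  | nil => simp
  | cons p t ih =>
    by_cases h1 : p.1 = k <;> by_cases h2 : p.1 = k' <;>
      simp_all [List.filter_cons, List.find?_cons]

lemma rel_empty : WRel [] [] PySem.Dict.empty PySem.Dict.empty 0 := by
  refine ⟨List.nodup_nil, ?_, ?_, ?_, rfl⟩ <;> intro x <;>
    simp [PySem.Dict.get?_empty, PySem.Dict.getD_empty]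

lemma rel_add {win winEles : List Int} {repEles freq : PySem.Dict Int Int} {u : Int} (e : Int)
    (h : WRel win winEles repEles freq u) :
    WRel (win ++ [e]) (aAdd winEles repEles e).1 (aAdd winEles repEles e).2
      (bAdd freq u e).1 (bAdd freq u e).2 := by
  obtain ⟨hnd, hmem, hrep, hfreq, hu⟩ := h
  have hce : (win ++ [e]).count e = win.count e + 1 := by simp
  have hcx : ∀ x : Int, x ≠ e → (win ++ [e]).count x = win.count x := by
    intro x hx; simp [List.count_append, List.count_cons, Ne.symm hx]
  by_cases h1 : win.count e = 1
  · have he : e ∈ winEles := (hmem e).mpr h1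
    have hlen : 0 < winEles.length := List.length_pos_of_mem he
    have hremove : PySem.List.remove? winEles e = some (winEles.erase e) :=
      PySem.List.remove?_eq_some_erase winEles e he
    have hfe : freq.getD e 0 = 1 := by rw [hfreq e, h1]; rfl
    have hcont : (repEles.insert e 1).contains e = true := by
      rw [PySem.Dict.contains_eq_isSome_get?, PySem.Dict.get?_insert_self]; rfl
    have hA : aAdd winEles repEles e = (winEles.erase e, (repEles.insert e 1).insert e 2) := by
      simp [aAdd, he, hremove, hcont, PySem.Dict.getD_insert_self]
    have hB : bAdd freq u e = (freq.insert e 2, u - 1) := by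
      simp [bAdd, hfe]
    rw [hA, hB]
    refine ⟨hnd.erase e, ?_, ?_, ?_, ?_⟩
    · intro x
      by_cases hx : x = e
      · subst hx
        simp [hnd.mem_erase_iff, hce, h1]
      · simp [hnd.mem_erase_iff, hx, hcx x hx, hmem x]
    · intro x
      by_cases hx : x = e
      · subst hx
        rw [PySem.Dict.get?_insert_self, hce, h1, if_pos (by omega)]
        rfl
      · rw [PySem.Dict.get?_insert, if_neg hx, PySem.Dict.get?_insert, if_neg hx,
          hrep x, hcx x hx]
    · intro x
      rw [PySem.Dict.getD_insert]
      by_cases hx : x = e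
      · subst hx; rw [if_pos rfl, hce, h1]; rfl
      · rw [if_neg hx, hfreq x, hcx x hx]
    · rw [hu, List.length_erase_of_mem he]
      omega
  · have he : e ∉ winEles := fun hmm => h1 ((hmem e).mp hmm)
    by_cases h2 : win.count e = 0
    · have hrepe : repEles.get? e = none := by rw [hrep e, h2]; rfl
      have hcont : repEles.contains e = false := by
        rw [PySem.Dict.contains_eq_isSome_get?, hrepe]; rfl
      have hA : aAdd winEles repEles e = (winEles ++ [e], repEles) := by
        simp [aAdd, he, hcont]
      have hB : bAdd freq u e = (freq.insert e 1, u + 1) := by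
        have hf0 : freq.getD e 0 = 0 := by rw [hfreq e, h2]; rfl
        simp [bAdd, hf0]
      rw [hA, hB]
      refine ⟨?_, ?_, ?_, ?_, ?_⟩
      · simp [List.nodup_append, hnd]
        exact fun a ha hae => he (hae ▸ ha)
      · intro x
        by_cases hx : x = e
        · subst hx; simp [hce, h2]
        · simp [hx, hcx x hx, hmem x]
      · intro x
        rw [hrep x]
        by_cases hx : x = e
        · subst hx; rw [hce, h2]; simp
        · rw [hcx x hx]
      · intro x
        rw [PySem.Dict.getD_insert]
        by_cases hx : x = e
        · subst hx; rw [if_pos rfl, hce, h2]; rfl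
        · rw [if_neg hx, hfreq x, hcx x hx]
      · simp [hu]
    · have hc2 : 2 ≤ win.count e := by omega
      have hrepe : repEles.get? e = some ((win.count e : Nat) : Int) := by
        rw [hrep e, if_pos hc2]
      have hcont : repEles.contains e = true := by
        rw [PySem.Dict.contains_eq_isSome_get?, hrepe]; rfl
      have hgd : repEles.getD e 0 = ((win.count e : Nat) : Int) := by
        simp [PySem.Dict.getD, hrepe]
      have hA : aAdd winEles repEles e
          = (winEles, repEles.insert e (((win.count e : Nat) : Int) + 1)) := by
        simp [aAdd, he, hcont, hgd]
      have hB : bAdd freq u e = (freq.insert e (((win.count e : Nat) : Int) + 1), u) := by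
        simp [bAdd, hfreq e]
        rw [if_neg h2, if_neg h1]
      rw [hA, hB]
      refine ⟨hnd, ?_, ?_, ?_, hu⟩
      · intro x
        by_cases hx : x = e
        · subst hx; simp [he, hce]; omega
        · simp [hx, hcx x hx, hmem x]
      · intro x
        by_cases hx : x = e
        · subst hx
          rw [PySem.Dict.get?_insert_self, hce, if_pos (by omega)]
          push_cast
          rfl
        · rw [PySem.Dict.get?_insert, if_neg hx, hrep x, hcx x hx]
      · intro x
        rw [PySem.Dict.getD_insert]
        by_cases hx : x = e
        · subst hx; rw [if_pos rfl, hce]; push_cast; rfl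
        · rw [if_neg hx, hfreq x, hcx x hx]

lemma rel_remove {rest winEles : List Int} {repEles freq : PySem.Dict Int Int} {u : Int} (y : Int)
    (h : WRel (y :: rest) winEles repEles freq u) :
    WRel rest (aRemove winEles repEles y).1 (aRemove winEles repEles y).2
      (bRemove freq u y).1 (bRemove freq u y).2 := by
  obtain ⟨hnd, hmem, hrep, hfreq, hu⟩ := h
  have hcy : (y :: rest).count y = rest.count y + 1 := by simp
  have hcx : ∀ x : Int, x ≠ y → (y :: rest).count x = rest.count x := by
    intro x hx; simp [List.count_cons, Ne.symm hx]
  rcases Nat.lt_or_ge (rest.count y) 1 with hc | hc1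
  · -- this window holds y exactly once
    have hc0 : rest.count y = 0 := by omega
    have hwc : (y :: rest).count y = 1 := by omega
    have hy : y ∈ winEles := (hmem y).mpr hwc
    have hlen : 0 < winEles.length := List.length_pos_of_mem hy
    have hrepe : repEles.get? y = none := by
      rw [hrep y, if_neg (by omega : ¬ 2 ≤ (y :: rest).count y)]
    have hcont : repEles.contains y = false := by
      rw [PySem.Dict.contains_eq_isSome_get?, hrepe]; rfl
    have hremove : PySem.List.remove? winEles y = some (winEles.erase y) :=
      PySem.List.remove?_eq_some_erase winEles y hy
    have hA : aRemove winEles repEles y = (winEles.erase y, repEles) := by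
      simp [aRemove, hcont, hremove]
    have hB : bRemove freq u y = (freq.insert y 0, u - 1) := by
      have hf1 : freq.getD y 0 = 1 := by rw [hfreq y, hwc]; rfl
      simp [bRemove, hf1]
    rw [hA, hB]
    refine ⟨hnd.erase y, ?_, ?_, ?_, ?_⟩
    · intro x
      by_cases hx : x = y
      · subst hx; simp [hnd.mem_erase_iff, hc0]
      · simp [hnd.mem_erase_iff, hx, hmem x, hcx x hx]
    · intro x
      rw [hrep x]
      by_cases hx : x = y
      · subst hx; rw [hwc, hc0]; simp
      · rw [hcx x hx]
    · intro x
      rw [PySem.Dict.getD_insert]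
      by_cases hx : x = y
      · subst hx; rw [if_pos rfl, hc0]; rfl
      · rw [if_neg hx, hfreq x, hcx x hx]
    · rw [hu, List.length_erase_of_mem hy]
      omega
  · rcases Nat.lt_or_ge (rest.count y) 2 with hc | hc2
    · -- this window holds y exactly twice
      have hc1' : rest.count y = 1 := by omega
      have hwc : (y :: rest).count y = 2 := by omega
      have hy : y ∉ winEles := by
        intro hmm; have := (hmem y).mp hmm; omega
      have hrepe : repEles.get? y = some 2 := by
        rw [hrep y, if_pos (by omega), hwc]; rfl
      have hcont : repEles.contains y = true := by
        rw [PySem.Dict.contains_eq_isSome_get?, hrepe]; rfl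
      have hgd : repEles.getD y 0 = 2 := by simp [PySem.Dict.getD, hrepe]
      have hA : aRemove winEles repEles y = (winEles ++ [y], repEles.erase y) := by
        simp [aRemove, hcont, hgd]
      have hB : bRemove freq u y = (freq.insert y 1, u + 1) := by
        have hf2 : freq.getD y 0 = 2 := by rw [hfreq y, hwc]; rfl
        simp [bRemove, hf2]
      rw [hA, hB]
      refine ⟨?_, ?_, ?_, ?_, ?_⟩
      · simp [List.nodup_append, hnd]
        exact fun a ha hae => hy (hae ▸ ha)
      · intro x
        by_cases hx : x = y
        · subst hx; simp [hc1']
        · simp [hx, hmem x, hcx x hx]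
      · intro x
        rw [dict_get?_erase]
        by_cases hx : x = y
        · subst hx; rw [if_pos rfl, hc1']; simp
        · rw [if_neg hx, hrep x, hcx x hx]
      · intro x
        rw [PySem.Dict.getD_insert]
        by_cases hx : x = y
        · subst hx; rw [if_pos rfl, hc1']; rfl
        · rw [if_neg hx, hfreq x, hcx x hx]
      · simp [hu]
    · -- this window holds y at least three times
      have hwc : (y :: rest).count y = rest.count y + 1 := hcy
      have hy : y ∉ winEles := by
        intro hmm; have := (hmem y).mp hmm; omega
      have hrepe : repEles.get? y = some ((rest.count y + 1 : Nat) : Int) := by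
        rw [hrep y, if_pos (by omega), hwc]
      have hcont : repEles.contains y = true := by
        rw [PySem.Dict.contains_eq_isSome_get?, hrepe]; rfl
      have hgd : repEles.getD y 0 = ((rest.count y + 1 : Nat) : Int) := by
        simp [PySem.Dict.getD, hrepe]
      have hval : ((rest.count y + 1 : Nat) : Int) - 1 = ((rest.count y : Nat) : Int) := by
        push_cast; ring
      have hA : aRemove winEles repEles y
          = (winEles, repEles.insert y ((rest.count y : Nat) : Int)) := by
        simp [aRemove, hcont, hgd, hval]
        rw [if_neg (by omega : ¬ ((rest.count y : Nat) : Int) + 1 = 2),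
          if_pos (by omega : 2 ≤ rest.count y)]
      have hB : bRemove freq u y = (freq.insert y ((rest.count y : Nat) : Int), u) := by
        have hf : freq.getD y 0 = ((rest.count y + 1 : Nat) : Int) := by rw [hfreq y, hwc]
        simp [bRemove, hf, hval]
        rw [if_neg (by omega : ¬ rest.count y = 0),
          if_neg (by omega : ¬ ((rest.count y : Nat) : Int) + 1 = 2)]
      rw [hA, hB]
      refine ⟨hnd, ?_, ?_, ?_, hu⟩
      · intro x
        by_cases hx : x = y
        · subst hx; simp [hy]; omega
        · simp [hx, hmem x, hcx x hx]
      · intro x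
        by_cases hx : x = y
        · subst hx
          rw [PySem.Dict.get?_insert_self, if_pos (by omega)]
        · rw [PySem.Dict.get?_insert, if_neg hx, hrep x, hcx x hx]
      · intro x
        rw [PySem.Dict.getD_insert]
        by_cases hx : x = y
        · subst hx; rw [if_pos rfl]
        · rw [if_neg hx, hfreq x, hcx x hx]

lemma rel_loop1 (elems : List Int) :
    ∀ (win winEles : List Int) (repEles freq : PySem.Dict Int Int) (u : Int),
    WRel win winEles repEles freq u →
    WRel (win ++ elems)
      ((elems.foldl (fun st x => aAdd st.1 st.2 x) (winEles, repEles)).1)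
      ((elems.foldl (fun st x => aAdd st.1 st.2 x) (winEles, repEles)).2)
      ((elems.foldl (fun st x => bAdd st.1 st.2 x) (freq, u)).1)
      ((elems.foldl (fun st x => bAdd st.1 st.2 x) (freq, u)).2) := by
  induction elems with
  | nil => intro win wE rep freq u h; simpa using h
  | cons e t ih =>
    intro win wE rep freq u h
    simp only [List.foldl_cons]
    have h' := ih (win ++ [e]) _ _ _ _ (rel_add e h)
    simpa [List.append_assoc] using h'

lemma rel_loop2 (nums : List Int) (kn : Nat) (hk : 1 ≤ kn) :
    ∀ (m p : Nat) (winEles : List Int) (repEles freq : PySem.Dict Int Int) (u s : Int),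
    p + kn + m = nums.length →
    WRel ((nums.drop p).take kn) winEles repEles freq u →
    ((PySem.List.pyRange ((p : Int) + 1) ((nums.length : Int) - (kn : Int) + 1)).foldl
        (aBody nums (kn : Int)) (s, winEles, repEles)).1
      = ((PySem.List.pyRange ((kn : Int) + (p : Int)) (nums.length : Int)).foldl
        (bBody nums (kn : Int)) (freq, u, s)).2.2 := by
  obtain ⟨kn', rfl⟩ : ∃ kn', kn = kn' + 1 := ⟨kn - 1, by omega⟩
  intro m
  induction m with
  | zero =>
    intro p wE rep freq u s hn hrel
    rw [PySem.List.pyRange_one_eq_nil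
        (by omega : ((nums.length : Int) - ((kn' + 1 : Nat) : Int) + 1) ≤ (p : Int) + 1),
      PySem.List.pyRange_one_eq_nil
        (by omega : (nums.length : Int) ≤ ((kn' + 1 : Nat) : Int) + (p : Int))]
    simp
  | succ m ih =>
    intro p wE rep freq u s hn hrel
    have hpn : p < nums.length := by omega
    have hkpn : kn' + 1 + p < nums.length := by omega
    rw [PySem.List.pyRange_one_cons
        (by omega : ((p : Int) + 1) < (nums.length : Int) - ((kn' + 1 : Nat) : Int) + 1),
      PySem.List.pyRange_one_cons
        (by omega : (((kn' + 1 : Nat) : Int) + (p : Int)) < (nums.length : Int))]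
    simp only [List.foldl_cons]
    have e1 : PySem.List.pyGetD nums ((p : Int) + 1 - 1) 0 = nums.getD p 0 := by
      rw [show ((p : Int) + 1 - 1) = ((p : Nat) : Int) by ring, PySem.List.pyGetD_natCast]
    have e2 : PySem.List.pyGetD nums (((kn' + 1 : Nat) : Int) + ((p : Int) + 1) - 1) 0
        = nums.getD (kn' + 1 + p) 0 := by
      rw [show (((kn' + 1 : Nat) : Int) + ((p : Int) + 1) - 1) = (((kn' + 1 + p : Nat)) : Int) by
          push_cast; ring,
        PySem.List.pyGetD_natCast]
    have e1b : PySem.List.pyGetD nums (((kn' + 1 : Nat) : Int) + (p : Int) - ((kn' + 1 : Nat) : Int)) 0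
        = nums.getD p 0 := by
      rw [show (((kn' + 1 : Nat) : Int) + (p : Int) - ((kn' + 1 : Nat) : Int)) = ((p : Nat) : Int) by
          ring,
        PySem.List.pyGetD_natCast]
    have e2b : PySem.List.pyGetD nums (((kn' + 1 : Nat) : Int) + (p : Int)) 0
        = nums.getD (kn' + 1 + p) 0 := by
      rw [show (((kn' + 1 : Nat) : Int) + (p : Int)) = (((kn' + 1 + p : Nat)) : Int) by push_cast; ring,
        PySem.List.pyGetD_natCast]
    have hwin : (nums.drop p).take (kn' + 1) = nums.getD p 0 :: ((nums.drop (p + 1)).take kn') := by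
      rw [List.drop_eq_getElem_cons hpn, List.take_succ_cons,
        List.getD_eq_getElem nums 0 hpn]
    have hwin2 : ((nums.drop (p + 1)).take kn') ++ [nums.getD (kn' + 1 + p) 0]
        = (nums.drop (p + 1)).take (kn' + 1) := by
      rw [List.take_succ, List.getElem?_drop,
        show p + 1 + kn' = kn' + 1 + p from by omega,
        List.getElem?_eq_getElem (by omega : kn' + 1 + p < nums.length),
        List.getD_eq_getElem nums 0 (by omega : kn' + 1 + p < nums.length)]
      rfl
    rw [hwin] at hrel
    have hrel' := rel_remove (y := nums.getD p 0) hrel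
    have hrel'' := rel_add (e := nums.getD (kn' + 1 + p) 0) hrel'
    rw [hwin2] at hrel''
    simp only [aBody, bBody]
    rw [e1, e2, e1b, e2b]
    have hulen := hrel''.2.2.2.2
    have key := ih (p + 1) _ _ _ _
        (s + (bAdd (bRemove freq u (nums.getD p 0)).1 (bRemove freq u (nums.getD p 0)).2
            (nums.getD (kn' + 1 + p) 0)).2)
        (by omega) hrel''
    have hc1 : ((p + 1 : Nat) : Int) + 1 = (p : Int) + 1 + 1 := by push_cast; ring
    have hc2 : ((kn' + 1 : Nat) : Int) + ((p + 1 : Nat) : Int)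
        = ((kn' + 1 : Nat) : Int) + (p : Int) + 1 := by push_cast; ring
    rw [hc1, hc2] at key
    rw [← hulen]
    exact key

lemma map_getD_range_take (l : List Int) (m : Nat) (h : m ≤ l.length) :
    (List.range m).map (fun j => l.getD j 0) = l.take m := by
  apply List.ext_getElem
  · simp [List.length_take]; omega
  · intro i h1 h2
    simp only [List.getElem_map, List.getElem_range, List.getElem_take]
    have hi : i < l.length := by
      simp only [List.length_map, List.length_range] at h1
      omega
    simp [List.getD_eq_getElem?_getD, List.getElem?_eq_getElem hi]

lemma first_fold_elems (nums : List Int) (kn : Nat) (h : kn ≤ nums.length) :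
    (PySem.List.pyRange 0 (kn : Int)).map (fun i => PySem.List.pyGetD nums i 0)
      = nums.take kn := by
  rw [PySem.List.pyRange_one 0 (kn : Int), List.map_map]
  have h1 : ((kn : Int) - 0).toNat = kn := by omega
  rw [h1]
  have h2 : ((fun i => PySem.List.pyGetD nums i 0) ∘ fun j : Nat => (0 : Int) + (j : Int))
      = fun j : Nat => nums.getD j 0 := by
    funext j
    simp [Function.comp, PySem.List.pyGetD_natCast]
  rw [h2, map_getD_range_take nums kn h]

-- ===== VERDICT (by name: the statement is the Claim_ definition above) =====
theorem slidingWindowUniqueElementsSum_spec : Claim_equal_slidingWindowUniqueElementsSum := by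
  intro nums k hdom hpre
  unfold Spec_slidingWindowUniqueElementsSum
  rcases hpre with hk | ⟨rfl, rfl⟩
  · simp only [slidingWindowUniqueElementsSum, slidingWindowUniqueElementsSum_alt]
    by_cases hlt : (nums.length : Int) < k
    · rw [if_pos hlt, if_pos hlt, if_neg (show ¬ k < (nums.length : Int) by omega)]
      rw [PySem.List.pyRange_one_eq_nil (le_refl (1 : Int)),
        PySem.List.pyRange_one_eq_nil (le_refl ((nums.length : Int)))]
      simp only [List.foldl_nil]
      rw [PySem.List.slice_to nums (by omega : (0 : Int) ≤ (nums.length : Int)),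
        Int.toNat_natCast, List.take_length]
      have hfold : (PySem.List.pyRange 0 ((nums.length : Int))).foldl
          (fun st i => aAdd st.1 st.2 (PySem.List.pyGetD nums i 0))
          (([] : List Int), PySem.Dict.empty)
          = nums.foldl (fun st x => aAdd st.1 st.2 x) (([] : List Int), PySem.Dict.empty) := by
        conv_rhs => rw [← PySem.List.map_pyGetD_pyRange_zero nums 0]
        simp [List.foldl_map, PySem.List.len]
      rw [hfold]
      have h1 := rel_loop1 nums [] [] PySem.Dict.empty PySem.Dict.empty 0 rel_empty
      simp only [List.nil_append] at h1
      exact h1.2.2.2.2.symm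
    · obtain ⟨kn, rfl⟩ : ∃ kn : Nat, k = (kn : Int) :=
        ⟨k.toNat, ((Int.toNat_of_nonneg (by omega)).symm)⟩
      have hkn1 : 1 ≤ kn := by omega
      have hknle : kn ≤ nums.length := by omega
      rw [if_neg hlt, if_neg hlt,
        show (if (kn : Int) < (nums.length : Int) then (kn : Int) else (nums.length : Int))
            = (kn : Int) from by split <;> omega]
      rw [PySem.List.slice_to nums (by omega : (0 : Int) ≤ (kn : Int)), Int.toNat_natCast]
      have hfold : (PySem.List.pyRange 0 ((kn : Int))).foldl
          (fun st i => aAdd st.1 st.2 (PySem.List.pyGetD nums i 0))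
          (([] : List Int), PySem.Dict.empty)
          = (nums.take kn).foldl (fun st x => aAdd st.1 st.2 x)
            (([] : List Int), PySem.Dict.empty) := by
        rw [← first_fold_elems nums kn hknle, List.foldl_map]
      rw [hfold]
      set stA := (nums.take kn).foldl (fun st x => aAdd st.1 st.2 x)
        (([] : List Int), PySem.Dict.empty) with hstA
      set stB := (nums.take kn).foldl (fun st x => bAdd st.1 st.2 x)
        (PySem.Dict.empty, (0 : Int)) with hstB
      have h1 := rel_loop1 (nums.take kn) [] [] PySem.Dict.empty PySem.Dict.empty 0 rel_empty
      simp only [List.nil_append] at h1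
      rw [← hstA, ← hstB] at h1
      have hu := h1.2.2.2.2
      have h2 := rel_loop2 nums kn hkn1 (nums.length - kn) 0 stA.1 stA.2 stB.1 stB.2
          ((stA.1.length : Int)) (by omega) (by simpa using h1)
      simp only [Nat.cast_zero, zero_add, add_zero] at h2
      rw [← hu] at h2 ⊢
      exact h2
  · decide
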